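-- pv_equiv track=rewrite | github.com/CGruich/RedoxFlow | scripts/redoxflow.py | _split_args_allow_spaces
-- ===== SOURCE A (Python) =====
-- from typing import List, Dict, Any, Set, Optional, Tuple
--
-- def _split_args_allow_spaces(argstr: str) -> List[str]:
--     """
--     Robustly split an unquoted argument string where values (paths) may contain spaces.
--     Heuristic: treat any token following a flag (starts with '-') as part of its value
--     until the next token that starts with '-' (a new flag).
--     """
--     if not argstr:
--         return []
--     raw = argstr.strip().split()
--     out: List[str] = []
--     i = 0
--     while i < len(raw):
--         tok = raw[i]
--         if tok.startswith("-"):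
--             out.append(tok)
--             i += 1
--             # gather value(s) until next flag or end
--             start = i
--             while i < len(raw) and not raw[i].startswith("-"):
--                 i += 1
--             if i > start:
--                 out.append(" ".join(raw[start:i]))
--         else:
--             # standalone (unlikely), keep as-is
--             out.append(tok)
--             i += 1
--     return out
-- ===== SOURCE B (Python) =====
-- from typing import List
--
-- def _split_args_allow_spaces(argstr: str) -> List[str]:
--     out: List[str] = []
--     pending: List[str] = []
--     seen_flag = False
--     for tok in argstr.split():
--         if tok.startswith("-"):
--             if pending:
--                 out.append(" ".join(pending))
--                 pending = []
--             out.append(tok)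
--             seen_flag = True
--         elif seen_flag:
--             pending.append(tok)
--         else:
--             out.append(tok)
--     if pending:
--         out.append(" ".join(pending))
--     return out
-- ===== Notes on version B (the rewrite author's own statement) =====
-- stated objective: simpler
-- what changed: A's index-driven while loop with a nested inner while that gathers value tokens after each flag is replaced by a single forward for-loop over the tokens that buffers pending value tokens and flushes the buffer (joined with spaces) at each new flag and at the end.
import Mathlib
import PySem

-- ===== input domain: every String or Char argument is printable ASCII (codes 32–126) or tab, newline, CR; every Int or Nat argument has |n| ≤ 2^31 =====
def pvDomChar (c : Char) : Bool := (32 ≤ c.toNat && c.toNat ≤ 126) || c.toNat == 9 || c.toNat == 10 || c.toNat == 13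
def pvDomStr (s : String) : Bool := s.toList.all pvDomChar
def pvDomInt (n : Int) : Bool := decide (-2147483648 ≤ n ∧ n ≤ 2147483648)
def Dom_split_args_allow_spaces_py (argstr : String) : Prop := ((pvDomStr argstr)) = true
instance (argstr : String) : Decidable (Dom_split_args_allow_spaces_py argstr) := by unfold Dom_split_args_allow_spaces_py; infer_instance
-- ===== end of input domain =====

-- B replaces A's index-driven while loop with nested value-gathering loop by a single
-- forward pass that buffers pending value tokens and flushes them at each new flag (objective: simpler).

-- ===== PORT A =====
-- inner `while i < len(raw) and not raw[i].startswith("-")` loop: collects the value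
-- tokens and returns the remaining suffix (the index i is the suffix of raw from i on)
def pvGatherA : List String → List String × List String
  | [] => ([], [])
  | t :: ts =>
    if PySem.Str.startswith t "-" then ([], t :: ts)
    else
      let p := pvGatherA ts
      (t :: p.1, p.2)

theorem pvGatherA_len (ts : List String) : (pvGatherA ts).2.length ≤ ts.length := by
  induction ts with
  | nil => simp [pvGatherA]
  | cons t ts ih =>
    simp only [pvGatherA]
    split
    · simp
    · simpa using Nat.le_succ_of_le ih

-- outer `while i < len(raw)` loop over the remaining suffix of raw
def pvLoopA : List String → List String
  | [] => []
  | t :: ts =>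
    if PySem.Str.startswith t "-" then
      let p := pvGatherA ts
      t :: ((if p.1 = [] then [] else [PySem.Str.join " " p.1]) ++ pvLoopA p.2)
    else
      t :: pvLoopA ts
termination_by ts => ts.length
decreasing_by
  · simp only [List.length_cons]; have := pvGatherA_len ts; omega
  · simp only [List.length_cons]; omega

def split_args_allow_spaces_py (argstr : String) : List String :=
  if argstr = "" then []
  else
    let raw := PySem.Str.split₀ (PySem.Str.strip argstr)
    pvLoopA raw

-- ===== PORT B =====
-- single pass: state = (seen_flag, pending, out)
def pvLoopB : List String → Bool → List String → List String → List String
  | [], _, pending, out =>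
    out ++ (if pending = [] then [] else [PySem.Str.join " " pending])
  | t :: ts, seen, pending, out =>
    if PySem.Str.startswith t "-" then
      pvLoopB ts true []
        ((out ++ (if pending = [] then [] else [PySem.Str.join " " pending])) ++ [t])
    else if seen then
      pvLoopB ts seen (pending ++ [t]) out
    else
      pvLoopB ts seen pending (out ++ [t])

def split_args_allow_spaces_py_alt (argstr : String) : List String :=
  pvLoopB (PySem.Str.split₀ argstr) false [] []

-- ===== PRECONDITION & SPEC =====
def Spec_split_args_allow_spaces_py (argstr : String) (out : List String) : Prop := out = split_args_allow_spaces_py_alt argstr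
instance (argstr : String) (out : List String) : Decidable (Spec_split_args_allow_spaces_py argstr out) := by unfold Spec_split_args_allow_spaces_py; infer_instance

-- ===== CLAIM (what is proved, stated in full; the proofs are below) =====
def Claim_equal_split_args_allow_spaces_py : Prop := ∀ (argstr : String), Dom_split_args_allow_spaces_py argstr → Spec_split_args_allow_spaces_py argstr (split_args_allow_spaces_py argstr)

-- ===== LEMMAS AND PROOFS =====

-- s.split() ignores leading/trailing whitespace, so split₀ ∘ strip = split₀
theorem pvGo_all_ws : ∀ (ws : List Char), (∀ c ∈ ws, PySem.Chars.isspace c = true) →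
    ∀ (cur : List Char) (acc : List (List Char)),
    PySem.Chars.split₀.go ws cur acc = PySem.Chars.split₀.go [] cur acc := by
  intro ws
  induction ws with
  | nil => intro _ cur acc; rfl
  | cons c ws ih =>
    intro h cur acc
    have hc : PySem.Chars.isspace c = true := h c (by simp)
    have hws : ∀ d ∈ ws, PySem.Chars.isspace d = true := fun d hd => h d (by simp [hd])
    simp only [PySem.Chars.split₀.go, hc, if_true]
    by_cases hcur : cur.isEmpty
    · rw [if_pos hcur, ih hws]
      simp [PySem.Chars.split₀.go, hcur]
    · rw [if_neg hcur, ih hws]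
      simp only [PySem.Chars.split₀.go]
      rw [if_neg hcur]
      simp

theorem pvGo_append_ws (ws : List Char) (hw : ∀ c ∈ ws, PySem.Chars.isspace c = true) :
    ∀ (cs cur : List Char) (acc : List (List Char)),
    PySem.Chars.split₀.go (cs ++ ws) cur acc = PySem.Chars.split₀.go cs cur acc := by
  intro cs
  induction cs with
  | nil => intro cur acc; simpa using pvGo_all_ws ws hw cur acc
  | cons c cs ih =>
    intro cur acc
    simp only [List.cons_append, PySem.Chars.split₀.go]
    by_cases hc : PySem.Chars.isspace c
    · rw [if_pos hc, if_pos hc]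
      by_cases hcur : cur.isEmpty
      · rw [if_pos hcur, if_pos hcur, ih]
      · rw [if_neg hcur, if_neg hcur, ih]
    · rw [if_neg hc, if_neg hc, ih]

theorem pvGo_ws_prepend (ws : List Char) (hw : ∀ c ∈ ws, PySem.Chars.isspace c = true) :
    ∀ (cs : List Char) (acc : List (List Char)),
    PySem.Chars.split₀.go (ws ++ cs) [] acc = PySem.Chars.split₀.go cs [] acc := by
  induction ws with
  | nil => intro cs acc; rfl
  | cons c ws ih =>
    intro cs acc
    have hc : PySem.Chars.isspace c = true := hw c (by simp)
    simp only [List.cons_append, PySem.Chars.split₀.go, hc, if_true, List.isEmpty_nil]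
    exact ih (fun d hd => hw d (by simp [hd])) cs acc

theorem pvChars_split₀_strip (cs : List Char) :
    PySem.Chars.split₀ (PySem.Chars.strip cs) = PySem.Chars.split₀ cs := by
  unfold PySem.Chars.split₀ PySem.Chars.strip PySem.Chars.lstrip PySem.Chars.rstrip
  set x := List.dropWhile PySem.Chars.isspace cs with hx
  -- drop trailing whitespace of x
  have hxsplit : x = (List.dropWhile PySem.Chars.isspace x.reverse).reverse ++
      (List.takeWhile PySem.Chars.isspace x.reverse).reverse := by
    have h := congrArg List.reverse
      (List.takeWhile_append_dropWhile (p := PySem.Chars.isspace) (l := x.reverse))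
    rw [List.reverse_append, List.reverse_reverse] at h
    exact h.symm
  have h1 : PySem.Chars.split₀.go ((List.dropWhile PySem.Chars.isspace x.reverse).reverse) [] [] =
      PySem.Chars.split₀.go x [] [] := by
    conv_rhs => rw [hxsplit]
    rw [pvGo_append_ws]
    intro c hc
    rw [List.mem_reverse] at hc
    exact List.mem_takeWhile_imp hc
  have h2 : PySem.Chars.split₀.go x [] [] = PySem.Chars.split₀.go cs [] [] := by
    conv_rhs => rw [← List.takeWhile_append_dropWhile (p := PySem.Chars.isspace) (l := cs)]
    rw [pvGo_ws_prepend]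
    intro c hc
    exact List.mem_takeWhile_imp hc
  rw [h1, h2]

theorem pvStr_split₀_strip (s : String) :
    PySem.Str.split₀ (PySem.Str.strip s) = PySem.Str.split₀ s := by
  have h : List.map String.toList (PySem.Str.split₀ (PySem.Str.strip s)) =
      List.map String.toList (PySem.Str.split₀ s) := by
    rw [PySem.Str.split₀_map_toList, PySem.Str.split₀_map_toList,
      PySem.Str.toList_strip, pvChars_split₀_strip]
  have inj : Function.Injective String.toList := fun a b hab => by
    have := congrArg String.ofList hab; simpa using this
  exact List.map_injective_iff.mpr inj h

theorem pvLoopB_true (ts : List String) : ∀ (pending out : List String),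
    pvLoopB ts true pending out =
      out ++ (if pending ++ (pvGatherA ts).1 = [] then [] else
        [PySem.Str.join " " (pending ++ (pvGatherA ts).1)]) ++ pvLoopA (pvGatherA ts).2 := by
  induction ts with
  | nil => intro pending out; simp [pvLoopB, pvGatherA, pvLoopA]
  | cons t ts ih =>
    intro pending out
    by_cases ht : PySem.Str.startswith t "-"
    · simp only [pvLoopB, pvGatherA, ht, if_true]
      rw [ih]
      simp only [pvLoopA, ht, if_true]
      simp [List.append_assoc]
    · simp only [pvLoopB, pvGatherA, ht, if_false, Bool.false_eq_true, if_true]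
      rw [ih]
      simp [List.append_assoc]

theorem pvLoopB_false (ts : List String) : ∀ (out : List String),
    pvLoopB ts false [] out = out ++ pvLoopA ts := by
  induction ts with
  | nil => intro out; simp [pvLoopB, pvLoopA]
  | cons t ts ih =>
    intro out
    by_cases ht : PySem.Str.startswith t "-"
    · simp only [pvLoopB, ht, if_true]
      rw [pvLoopB_true]
      simp only [pvLoopA, ht, if_true]
      simp [List.append_assoc]
    · simp only [pvLoopB, ht, if_false, Bool.false_eq_true]
      rw [ih]
      simp only [pvLoopA]
      rw [if_neg ht]
      simp

-- ===== VERDICT (by name: the statement is the Claim_ definition above) =====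
theorem split_args_allow_spaces_py_spec : Claim_equal_split_args_allow_spaces_py := by
  intro argstr _
  unfold Spec_split_args_allow_spaces_py split_args_allow_spaces_py split_args_allow_spaces_py_alt
  by_cases h : argstr = ""
  · subst h
    rfl
  · rw [if_neg h, pvLoopB_false, pvStr_split₀_strip]
    simp
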